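-- pv_equiv track=rewrite | github.com/2817491550/LeetCode_vscode | 80.删除排序数组中的重复项-ii.py | removeDuplicates
-- ===== SOURCE A (Python) =====
-- def removeDuplicates(nums) -> int:
--     n=len(nums)
--     if not nums:
--         return 0
--     i=2
--     while i<n:
--         if nums[i]==nums[i-1]==nums[i-2]:
--             del nums[i]
--             n-=1
--             i-=1
--         i+=1
--     return len(nums)
-- ===== SOURCE B (Python) =====
-- def removeDuplicates(nums) -> int:
--     # One pass, O(1) state: count kept elements, tracking the last two kept values.
--     # Note: unlike A, this does not mutate nums; the equivalence is about the return value.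
--     cnt = 0
--     prev = prev2 = None
--     for x in nums:
--         if cnt >= 2 and x == prev and x == prev2:
--             continue
--         prev2, prev = prev, x
--         cnt += 1
--     return cnt
-- ===== Notes on version B (the rewrite author's own statement) =====
-- stated objective: faster
-- what changed: Replaces the while-loop that repeatedly deletes elements from the list (each del is an O(n) shift) with a single pass that counts kept elements while tracking only the last two kept values in O(1) state; B does not mutate nums (return-value equivalence).
import Mathlib
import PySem

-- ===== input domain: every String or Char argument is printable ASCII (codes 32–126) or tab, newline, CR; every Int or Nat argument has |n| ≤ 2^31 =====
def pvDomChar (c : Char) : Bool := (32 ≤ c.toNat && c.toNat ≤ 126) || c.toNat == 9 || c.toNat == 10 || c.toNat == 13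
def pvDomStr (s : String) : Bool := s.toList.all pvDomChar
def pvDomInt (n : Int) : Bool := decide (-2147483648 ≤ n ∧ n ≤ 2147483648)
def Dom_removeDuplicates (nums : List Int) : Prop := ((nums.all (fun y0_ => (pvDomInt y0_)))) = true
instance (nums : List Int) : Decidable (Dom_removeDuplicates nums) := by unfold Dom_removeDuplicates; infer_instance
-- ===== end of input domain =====

-- B replaces A's delete-in-place while loop with a one-pass count keeping O(1) state (faster);
-- A mutates its argument, B does not: the equivalence proved is about the RETURN value only.

-- ===== PORT A =====
-- the while loop: i advances, or (triple found) nums loses element i and i stays put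
-- (del nums[i]; i-=1; i+=1 leaves i unchanged).  All indices read are in range (2 ≤ i < length),
-- so List.getD is exact here.
def removeDuplicatesLoopA (l : List Int) (i : Nat) : List Int :=
  if h : i < l.length then
    if l.getD i 0 = l.getD (i-1) 0 ∧ l.getD i 0 = l.getD (i-2) 0 then
      removeDuplicatesLoopA (l.eraseIdx i) i
    else
      removeDuplicatesLoopA l (i+1)
  else l
termination_by l.length - i
decreasing_by
  · simp [List.length_eraseIdx, h]; omega
  · omega

def removeDuplicates (nums : List Int) : Int :=
  if nums = [] then 0
  else ((removeDuplicatesLoopA nums 2).length : Int)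

-- ===== PORT B =====
-- state = (cnt, prev, prev2): number kept, last kept value, second-last kept value
def removeDuplicatesStepB (s : Nat × Option Int × Option Int) (x : Int) : Nat × Option Int × Option Int :=
  if 2 ≤ s.1 ∧ some x = s.2.1 ∧ some x = s.2.2 then s
  else (s.1 + 1, some x, s.2.1)

def removeDuplicates_alt (nums : List Int) : Int :=
  ((nums.foldl removeDuplicatesStepB (0, none, none)).1 : Int)

-- ===== PRECONDITION & SPEC =====
def Spec_removeDuplicates (nums : List Int) (out : Int) : Prop := out = removeDuplicates_alt nums
instance (nums : List Int) (out : Int) : Decidable (Spec_removeDuplicates nums out) := by unfold Spec_removeDuplicates; infer_instance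

-- ===== CLAIM (what is proved, stated in full; the proofs are below) =====
def Claim_equal_removeDuplicates : Prop := ∀ (nums : List Int), Dom_removeDuplicates nums → Spec_removeDuplicates nums (removeDuplicates nums)

-- ===== LEMMAS AND PROOFS =====

-- the common functional core: the suffix kept, given the last two kept values a (older) and b
def cleanTail (a b : Int) : List Int → List Int
  | [] => []
  | x :: rest => if x = b ∧ x = a then cleanTail a b rest else x :: cleanTail b x rest

theorem getD_append_right {α : Type} [Inhabited α] (q l : List α) (k : Nat) (d : α) :
    (q ++ l).getD (q.length + k) d = l.getD k d := by
  simp [List.getD, List.getElem?_append_right (Nat.le_add_right q.length k)]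

theorem loopA_eq_cleanTail (rest : List Int) :
    ∀ (q : List Int) (a b : Int),
      removeDuplicatesLoopA (q ++ a :: b :: rest) (q.length + 2) =
        q ++ a :: b :: cleanTail a b rest := by
  induction rest with
  | nil =>
      intro q a b
      rw [removeDuplicatesLoopA, cleanTail]
      rw [dif_neg (by simp)]
  | cons x rest ih =>
      intro q a b
      rw [removeDuplicatesLoopA]
      have hlen : q.length + 2 < (q ++ a :: b :: x :: rest).length := by
        simp only [List.length_append, List.length_cons]
        omega
      have hi : (q ++ a :: b :: x :: rest).getD (q.length + 2) 0 = x := by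
        have := getD_append_right q (a :: b :: x :: rest) 2 (0 : Int)
        simpa using this
      have hi1 : (q ++ a :: b :: x :: rest).getD (q.length + 2 - 1) 0 = b := by
        have := getD_append_right q (a :: b :: x :: rest) 1 (0 : Int)
        simpa using this
      have hi2 : (q ++ a :: b :: x :: rest).getD (q.length + 2 - 2) 0 = a := by
        have := getD_append_right q (a :: b :: x :: rest) 0 (0 : Int)
        simpa using this
      rw [dif_pos hlen, hi, hi1, hi2]
      by_cases hc : x = b ∧ x = a
      · rw [if_pos hc]
        have herase : (q ++ a :: b :: x :: rest).eraseIdx (q.length + 2) =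
            q ++ a :: b :: rest := by
          have he : (q ++ a :: b :: x :: rest) = (q ++ [a, b]) ++ x :: rest := by simp
          rw [he]
          have hlen2 : (q ++ [a, b]).length = q.length + 2 := by simp
          rw [← hlen2, List.eraseIdx_append_of_length_le (Nat.le_refl _)]
          simp
        rw [herase, ih q a b, cleanTail, if_pos hc]
      · rw [if_neg hc]
        have hq : q ++ a :: b :: x :: rest = (q ++ [a]) ++ b :: x :: rest := by simp
        have hl : q.length + 2 + 1 = (q ++ [a]).length + 2 := by simp
        rw [hq, hl, ih (q ++ [a]) b x, cleanTail, if_neg hc]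
        simp

theorem foldB_eq_cleanTail (rest : List Int) :
    ∀ (cnt : Nat) (a b : Int), 2 ≤ cnt →
      (rest.foldl removeDuplicatesStepB (cnt, some b, some a)).1 =
        cnt + (cleanTail a b rest).length := by
  induction rest with
  | nil => intro cnt a b _; simp [cleanTail]
  | cons x rest ih =>
      intro cnt a b hcnt
      simp only [List.foldl_cons]
      by_cases hc : x = b ∧ x = a
      · have hstep : removeDuplicatesStepB (cnt, some b, some a) x = (cnt, some b, some a) := by
          simp only [removeDuplicatesStepB]
          rw [if_pos ⟨hcnt, by rw [hc.1], by rw [hc.2]⟩]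
        rw [hstep, ih cnt a b hcnt, cleanTail, if_pos hc]
      · have hstep : removeDuplicatesStepB (cnt, some b, some a) x = (cnt + 1, some x, some b) := by
          simp only [removeDuplicatesStepB]
          rw [if_neg]
          intro h
          exact hc ⟨Option.some_inj.mp h.2.1, Option.some_inj.mp h.2.2⟩
        rw [hstep, ih (cnt + 1) b x (by omega), cleanTail, if_neg hc]
        simp; omega

-- ===== VERDICT (by name: the statement is the Claim_ definition above) =====
theorem removeDuplicates_spec : Claim_equal_removeDuplicates := by
  intro nums _
  unfold Spec_removeDuplicates
  match nums with
  | [] => decide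
  | [a] =>
      simp [removeDuplicates, removeDuplicates_alt, removeDuplicatesStepB,
        removeDuplicatesLoopA]
  | [a, b] =>
      simp [removeDuplicates, removeDuplicates_alt, removeDuplicatesStepB,
        removeDuplicatesLoopA]
  | a :: b :: x :: rest =>
      have hA := loopA_eq_cleanTail (x :: rest) [] a b
      have hB := foldB_eq_cleanTail (x :: rest) 2 a b (by omega)
      simp only [List.nil_append, List.length_nil, Nat.zero_add] at hA
      have h1 : removeDuplicatesStepB (0, none, none) a = (1, some a, none) := by
        simp [removeDuplicatesStepB]
      have h2 : removeDuplicatesStepB (1, some a, none) b = (2, some b, some a) := by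
        simp [removeDuplicatesStepB]
      rw [removeDuplicates, if_neg (by simp : ¬ (a :: b :: x :: rest = [])), hA]
      rw [removeDuplicates_alt,
        show List.foldl removeDuplicatesStepB (0, none, none) (a :: b :: x :: rest)
           = List.foldl removeDuplicatesStepB (2, some b, some a) (x :: rest) from by
          rw [List.foldl_cons, h1, List.foldl_cons, h2],
        hB]
      simp
      ring
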